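-- pv_equiv track=rewrite | github.com/Felix-Petersen/LaTeXEqChecker | src/helper.py | split_at_every_splitter
-- ===== SOURCE A (Python) =====
-- def split_at_every_splitter(text, splitters):
--     parts = []
--     begin = 0
--     first_occurence = len(text)
--     end_of_first_occurence = 0
--     for splitter in splitters:
--         occurrence = text.find(splitter, begin)
--         if (occurrence != -1) & (first_occurence > occurrence):
--             first_occurence = text.find(splitter, begin)
--             end_of_first_occurence = first_occurence + len(splitter)
--     if first_occurence != len(text):
--         parts.append(text[:first_occurence])
--         parts.append(text[first_occurence:end_of_first_occurence])
--         for part in split_at_every_splitter(text[end_of_first_occurence:], splitters):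
--             parts.append(part)
--     else:
--         parts.append(text)
--     return parts
-- ===== SOURCE B (Python) =====
-- def split_at_every_splitter(text, splitters):
--     parts = []
--     begin = 0
--     i = 0
--     n = len(text)
--     while i < n:
--         for sp in splitters:
--             if text.startswith(sp, i):
--                 parts.append(text[begin:i])
--                 parts.append(sp)
--                 i += len(sp)
--                 begin = i
--                 break
--         else:
--             i += 1
--     parts.append(text[begin:])
--     return parts
-- ===== Notes on version B (the rewrite author's own statement) =====
-- stated objective: faster
-- what changed: A repeatedly calls text.find for every splitter over the whole remaining text and recurses on the suffix (O(n^2*k) scans); B makes one left-to-right pass, testing the splitters in order at each position and jumping past a match, so each character is visited once.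
import Mathlib
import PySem

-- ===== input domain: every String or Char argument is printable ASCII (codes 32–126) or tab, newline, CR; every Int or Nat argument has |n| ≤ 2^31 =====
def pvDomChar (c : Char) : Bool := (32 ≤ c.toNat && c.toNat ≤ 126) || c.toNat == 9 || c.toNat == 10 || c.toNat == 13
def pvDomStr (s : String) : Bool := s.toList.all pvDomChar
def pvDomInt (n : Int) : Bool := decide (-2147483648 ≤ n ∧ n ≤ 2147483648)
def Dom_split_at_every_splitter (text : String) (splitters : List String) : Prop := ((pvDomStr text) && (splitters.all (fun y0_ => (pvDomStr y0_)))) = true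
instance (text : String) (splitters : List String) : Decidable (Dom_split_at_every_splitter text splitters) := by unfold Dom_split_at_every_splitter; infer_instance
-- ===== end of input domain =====

-- B replaces A's per-splitter whole-text `find` scans + recursion by ONE left-to-right pass that
-- tests the splitters at each position and advances past matches (equal output; measured faster).


-- ===== PORT A =====
-- A, over List Char.  In A, `begin` stays 0 forever, so `text.find(splitter, begin)` is
-- `PySem.Chars.find text splitter`.  The recursion is run on fuel `text.length + 1` (a totality
-- guard only: under Pre_ every recursive call strictly shortens the text, so the fuel suffices).
def goA_step (t : List Char) (fe : Int × Int) (sp : List Char) : Int × Int :=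
  let occ := PySem.Chars.find t sp
  if occ ≠ -1 ∧ fe.1 > occ then (occ, occ + sp.length) else fe

def goA (sps : List (List Char)) : Nat → List Char → List (List Char)
  | 0, _ => []            -- fuel exhausted: unreachable under Pre_
  | fuel+1, t =>
    let fe := sps.foldl (goA_step t) ((t.length : Int), 0)
    if fe.1 ≠ (t.length : Int) then
      PySem.List.slice t none (some fe.1) ::
      PySem.List.slice t (some fe.1) (some fe.2) ::
      goA sps fuel (PySem.List.slice t (some fe.2) none)
    else [t]

def split_at_every_splitter (text : String) (splitters : List String) : List String :=
  (goA (splitters.map String.toList) (text.toList.length + 1) text.toList).map String.ofList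

-- ===== PORT B =====
-- B, over List Char: while i < n, try the splitters in order at position i
-- (`text.startswith(sp, i)` = sp prefix of drop i), emit text[begin:i] and sp on a match and jump
-- past it, else i += 1; finally emit text[begin:].  Fuel `text.length + 1` is a totality guard
-- only (under Pre_ each iteration advances i by at least 1).
def goB (sps : List (List Char)) (t : List Char) : Nat → List (List Char) → Nat → Nat → List (List Char)
  | 0, parts, _, _ => parts            -- fuel exhausted: unreachable under Pre_
  | fuel+1, parts, b, i =>
    if i < t.length then
      match sps.find? (fun sp => PySem.Chars.startswith (t.drop i) sp) with
      | some sp =>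
          goB sps t fuel (parts ++ [PySem.List.slice t (some (b : Int)) (some (i : Int)), sp])
            (i + sp.length) (i + sp.length)
      | none => goB sps t fuel parts b (i + 1)
    else parts ++ [PySem.List.slice t (some (b : Int)) none]

def split_at_every_splitter_alt (text : String) (splitters : List String) : List String :=
  (goB (splitters.map String.toList) text.toList (text.toList.length + 1) [] 0 0).map String.ofList

-- ===== PRECONDITION & SPEC =====
-- Pre_ excludes (for nonempty text) splitter lists containing the empty string: there A's recursion consumes nothing
-- and for almost every text A (and B) recurse/loop forever (RecursionError); on the exceptional
-- texts where an earlier splitter always preempts the empty one A does return — and B returns the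
-- same list — but termination is input-dependent, so these inputs are excluded wholesale.
def Pre_split_at_every_splitter (text : String) (splitters : List String) : Prop :=
  text = "" ∨ "" ∉ splitters
instance (text : String) (splitters : List String) : Decidable (Pre_split_at_every_splitter text splitters) := by unfold Pre_split_at_every_splitter; infer_instance

def pvWitness_split_at_every_splitter : String × List String := ("a+b=c", ["+", "="])

def Spec_split_at_every_splitter (text : String) (splitters : List String) (out : List String) : Prop := out = split_at_every_splitter_alt text splitters
instance (text : String) (splitters : List String) (out : List String) : Decidable (Spec_split_at_every_splitter text splitters out) := by unfold Spec_split_at_every_splitter; infer_instance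

-- ===== CLAIM (what is proved, stated in full; the proofs are below) =====
def Claim_equal_split_at_every_splitter : Prop := ∀ (text : String) (splitters : List String), Dom_split_at_every_splitter text splitters → Pre_split_at_every_splitter text splitters → Spec_split_at_every_splitter text splitters (split_at_every_splitter text splitters)

-- ===== LEMMAS AND PROOFS =====

-- "some splitter matches at position j of t"
def pvHit (sps : List (List Char)) (t : List Char) (j : Nat) : Prop :=
  ∃ sp ∈ sps, sp <+: List.drop j t

-- ---- A-side: characterising the fold that computes (first_occurence, end_of_first_occurence) ----
lemma fold_nohit (t : List Char) (l : List (List Char)) (fe : Int × Int)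
    (h : ∀ sp ∈ l, PySem.Chars.find t sp = -1) :
    l.foldl (goA_step t) fe = fe := by
  induction l generalizing fe with
  | nil => rfl
  | cons sp l ih =>
    have h0 := h sp (by simp)
    simp only [List.foldl_cons, goA_step, h0]
    rw [if_neg (by simp)]
    exact ih _ (fun x hx => h x (by simp [hx]))

lemma fold_pre (t : List Char) (j : Nat) (l : List (List Char)) (fe : Int × Int)
    (h : ∀ sp ∈ l, PySem.Chars.find t sp = -1 ∨ (j : Int) < PySem.Chars.find t sp)
    (hfe : (j : Int) < fe.1) :
    (j : Int) < (l.foldl (goA_step t) fe).1 := by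
  induction l generalizing fe with
  | nil => exact hfe
  | cons sp l ih =>
    simp only [List.foldl_cons]
    refine ih _ (fun x hx => h x (by simp [hx])) ?_
    simp only [goA_step]
    split_ifs with hc
    · rcases h sp (by simp) with h1 | h1
      · exact absurd h1 hc.1
      · exact h1
    · exact hfe

lemma fold_suf (t : List Char) (j : Nat) (e : Int) (l : List (List Char))
    (h : ∀ sp ∈ l, PySem.Chars.find t sp = -1 ∨ (j : Int) ≤ PySem.Chars.find t sp) :
    l.foldl (goA_step t) ((j : Int), e) = ((j : Int), e) := by
  induction l with
  | nil => rfl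
  | cons sp l ih =>
    simp only [List.foldl_cons, goA_step]
    rw [if_neg]
    · exact ih (fun x hx => h x (by simp [hx]))
    · rintro ⟨h1, h2⟩
      rcases h sp (by simp) with h3 | h3
      · exact h1 h3
      · omega

-- the least hit position j, with the first matching splitter sp, determines the fold's result
lemma fold_char (sps : List (List Char)) (t : List Char) (j : Nat) (sp : List Char)
    (hfind : sps.find? (fun sp => PySem.Chars.startswith (t.drop j) sp) = some sp)
    (hmin : ∀ k, k < j → ¬ pvHit sps t k) (hj : j < t.length) :
    sps.foldl (goA_step t) ((t.length : Int), 0) = ((j : Int), (j : Int) + sp.length) := by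
  have hspmem := List.mem_of_find?_eq_some hfind
  have hsp_pre : sp <+: t.drop j := (PySem.Chars.startswith_iff _ _).mp (List.find?_some hfind)
  -- any splitter found in t is found at position ≥ j
  have hge : ∀ x ∈ sps, PySem.Chars.find t x = -1 ∨ (j : Int) ≤ PySem.Chars.find t x := by
    intro x hx
    by_cases hfx : PySem.Chars.find t x = -1
    · exact Or.inl hfx
    · right
      have h0 : 0 ≤ PySem.Chars.find t x := by
        have := PySem.Chars.neg_one_le_find (s := t) (sub := x); omega
      obtain ⟨hp, _⟩ := PySem.Chars.find_spec (s := t) (sub := x) h0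
      have hk : ¬ (PySem.Chars.find t x).toNat < j := fun hlt => hmin _ hlt ⟨x, hx, hp⟩
      omega
  -- the winner's find is exactly j
  have hfsp : PySem.Chars.find t sp = (j : Int) := by
    have h0 : 0 ≤ PySem.Chars.find t sp := by
      rw [PySem.Chars.find_nonneg_iff]
      rw [← PySem.Chars.isIn_iff_infix, ← PySem.Chars.exists_prefix_drop_iff_isIn]
      exact ⟨j, hsp_pre⟩
    obtain ⟨hp, hlow⟩ := PySem.Chars.find_spec (s := t) (sub := sp) h0
    have h1 : ¬ (PySem.Chars.find t sp).toNat < j := fun hlt => hmin _ hlt ⟨sp, hspmem, hp⟩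
    have h2 : ¬ j < (PySem.Chars.find t sp).toNat := fun hlt => hlow j hlt hsp_pre
    omega
  -- splitters before the winner do not match at j, so their find is > j
  rw [List.find?_eq_some_iff_append] at hfind
  obtain ⟨_, pre, suf, hl, hprex⟩ := hfind
  have hpr : ∀ x ∈ pre, PySem.Chars.find t x = -1 ∨ (j : Int) < PySem.Chars.find t x := by
    intro x hx
    rcases hge x (by rw [hl]; exact List.mem_append_left _ hx) with h1 | h1
    · exact Or.inl h1
    · right
      rcases lt_or_eq_of_le h1 with h2 | h2
      · exact h2
      · exfalso
        have h0 : 0 ≤ PySem.Chars.find t x := by omega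
        obtain ⟨hp, _⟩ := PySem.Chars.find_spec (s := t) (sub := x) h0
        have hx' : x <+: t.drop j := by
          have : (PySem.Chars.find t x).toNat = j := by omega
          rwa [this] at hp
        have := hprex x hx
        rw [← PySem.Chars.startswith_iff] at hx'
        simp [hx'] at this
  have hsuf : ∀ x ∈ suf, PySem.Chars.find t x = -1 ∨ (j : Int) ≤ PySem.Chars.find t x := by
    intro x hx
    exact hge x (by rw [hl]; exact List.mem_append_right _ (List.mem_cons_of_mem _ hx))
  rw [hl, List.foldl_append, List.foldl_cons]
  have hmid : (j : Int) < (pre.foldl (goA_step t) ((t.length : Int), 0)).1 :=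
    fold_pre t j pre _ hpr (by show (j : Int) < (t.length : Int); exact_mod_cast hj)
  have hstep : goA_step t (pre.foldl (goA_step t) ((t.length : Int), 0)) sp
      = ((j : Int), (j : Int) + sp.length) := by
    simp only [goA_step, hfsp]
    rw [if_pos ⟨by omega, hmid⟩]
  rw [hstep]
  exact fold_suf t j _ suf hsuf

-- extracting the least hit and its properties
lemma least_hit (sps : List (List Char)) (t : List Char) (h : [] ∉ sps)
    (hex : ∃ j, pvHit sps t j) :
    ∃ j sp, sps.find? (fun sp => PySem.Chars.startswith (t.drop j) sp) = some sp ∧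
      (∀ k, k < j → ¬ pvHit sps t k) ∧ sp ∈ sps ∧ sp <+: t.drop j ∧
      1 ≤ sp.length ∧ j + sp.length ≤ t.length := by
  haveI : DecidablePred (pvHit sps t) := fun j => by unfold pvHit; infer_instance
  refine ⟨Nat.find hex, ?_⟩
  have hj := Nat.find_spec hex
  have hmin : ∀ k, k < Nat.find hex → ¬ pvHit sps t k := fun k hk => Nat.find_min hex hk
  obtain ⟨sp0, hsp0, hpre0⟩ := hj
  have hsome : (sps.find? (fun sp => PySem.Chars.startswith (t.drop (Nat.find hex)) sp)).isSome :=
    List.find?_isSome.mpr ⟨sp0, hsp0, (PySem.Chars.startswith_iff _ _).mpr hpre0⟩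
  obtain ⟨sp, hfind⟩ := Option.isSome_iff_exists.mp hsome
  have hmem := List.mem_of_find?_eq_some hfind
  have hpre : sp <+: t.drop (Nat.find hex) := (PySem.Chars.startswith_iff _ _).mp (List.find?_some hfind)
  have hne : 1 ≤ sp.length := by
    cases sp with
    | nil => exact absurd hmem h
    | cons c l => simp
  have hlen : sp.length ≤ (t.drop (Nat.find hex)).length := hpre.length_le
  rw [List.length_drop] at hlen
  exact ⟨sp, hfind, hmin, hmem, hpre, hne, by omega⟩

lemma goA_nohit (sps : List (List Char)) (t : List Char) (f : Nat)
    (h : ∀ j, ¬ pvHit sps t j) : goA sps (f+1) t = [t] := by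
  have hall : ∀ sp ∈ sps, PySem.Chars.find t sp = -1 := by
    intro sp hsp
    by_contra hne
    have hinf := (PySem.Chars.find_ne_neg_one_iff _ _).mp hne
    rw [← PySem.Chars.isIn_iff_infix, ← PySem.Chars.exists_prefix_drop_iff_isIn] at hinf
    obtain ⟨k, hk⟩ := hinf
    exact h k ⟨sp, hsp, hk⟩
  simp only [goA, fold_nohit t sps _ hall]
  simp

lemma goA_hit (sps : List (List Char)) (t : List Char) (f j : Nat) (sp : List Char)
    (hfind : sps.find? (fun sp => PySem.Chars.startswith (t.drop j) sp) = some sp)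
    (hmin : ∀ k, k < j → ¬ pvHit sps t k) (hpre : sp <+: t.drop j)
    (hsp : 1 ≤ sp.length) (hle : j + sp.length ≤ t.length) :
    goA sps (f+1) t = t.take j :: sp :: goA sps f (t.drop (j + sp.length)) := by
  have hj : j < t.length := by omega
  simp only [goA, fold_char sps t j sp hfind hmin hj]
  rw [if_pos (by exact_mod_cast Nat.ne_of_lt hj)]
  have hcast : (j : Int) + (sp.length : Int) = ((j + sp.length : Nat) : Int) := by push_cast; ring
  rw [hcast, PySem.List.slice_to_natCast, PySem.List.slice_natCast, PySem.List.slice_from_natCast]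
  have htk : (t.drop j).take (j + sp.length - j) = sp := by
    have : j + sp.length - j = sp.length := by omega
    rw [this]
    exact (List.prefix_iff_eq_take.mp hpre).symm
  rw [htk]

lemma goA_fuel (sps : List (List Char)) (h : [] ∉ sps) :
    ∀ f₁ f₂ t, t.length < f₁ → t.length < f₂ → goA sps f₁ t = goA sps f₂ t := by
  intro f₁
  induction f₁ with
  | zero => intro f₂ t hf; omega
  | succ n ih =>
    intro f₂ t hf1 hf2
    cases f₂ with
    | zero => omega
    | succ m =>
      by_cases hex : ∃ j, pvHit sps t j
      · obtain ⟨j, sp, hfind, hmin, _, hpre, hsp1, hle⟩ := least_hit sps t h hex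
        rw [goA_hit sps t n j sp hfind hmin hpre hsp1 hle,
            goA_hit sps t m j sp hfind hmin hpre hsp1 hle]
        have hlen : (t.drop (j + sp.length)).length = t.length - (j + sp.length) :=
          List.length_drop
        rw [ih m (t.drop (j + sp.length)) (by omega) (by omega)]
      · push Not at hex
        rw [goA_nohit sps t n hex, goA_nohit sps t m hex]

-- ---- B-side loop lemmas ----
lemma goB_nohit (sps : List (List Char)) (t : List Char) :
    ∀ f i parts b, 0 < f → t.length < i + f → (∀ k, i ≤ k → ¬ pvHit sps t k) →
      goB sps t f parts b i = parts ++ [PySem.List.slice t (some (b : Int)) none] := by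
  intro f
  induction f with
  | zero => intro i parts b hf; omega
  | succ n ih =>
    intro i parts b _ hlen hno
    by_cases hi : i < t.length
    · have hm : sps.find? (fun sp => PySem.Chars.startswith (t.drop i) sp) = none := by
        cases hm : sps.find? (fun sp => PySem.Chars.startswith (t.drop i) sp) with
        | none => rfl
        | some sp =>
          exact absurd ⟨sp, List.mem_of_find?_eq_some hm,
            (PySem.Chars.startswith_iff _ _).mp (List.find?_some hm)⟩ (hno i le_rfl)
      simp only [goB, if_pos hi, hm]
      exact ih (i+1) parts b (by omega) (by omega) (fun k hk => hno k (by omega))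
    · simp only [goB, if_neg hi]

lemma goB_scan (sps : List (List Char)) (t : List Char) (j : Nat) (hj : j < t.length)
    (hmin : ∀ k, k < j → ¬ pvHit sps t k) :
    ∀ d f i parts b, i + d = j →
      goB sps t (f + d) parts b i = goB sps t f parts b j := by
  intro d
  induction d with
  | zero => intro f i parts b hij; simp_all
  | succ n ih =>
    intro f i parts b hij
    have hi : i < t.length := by omega
    have hm : sps.find? (fun sp => PySem.Chars.startswith (t.drop i) sp) = none := by
      cases hm : sps.find? (fun sp => PySem.Chars.startswith (t.drop i) sp) with
      | none => rfl
      | some sp =>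
        exact absurd ⟨sp, List.mem_of_find?_eq_some hm,
          (PySem.Chars.startswith_iff _ _).mp (List.find?_some hm)⟩ (hmin i (by omega))
    have hfd : f + (n + 1) = (f + n) + 1 := by omega
    rw [hfd]
    simp only [goB, if_pos hi, hm]
    exact ih f (i+1) parts b (by omega)

lemma goB_acc (sps : List (List Char)) (t : List Char) :
    ∀ f parts b i, goB sps t f parts b i = parts ++ goB sps t f [] b i := by
  intro f
  induction f with
  | zero => intro parts b i; simp [goB]
  | succ n ih =>
    intro parts b i
    by_cases hi : i < t.length
    · cases hm : sps.find? (fun sp => PySem.Chars.startswith (t.drop i) sp) with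
      | some sp =>
        simp only [goB, if_pos hi, hm]
        rw [ih (parts ++ _), ih ([] ++ _), List.nil_append, List.append_assoc]
      | none =>
        simp only [goB, if_pos hi, hm]
        exact ih parts b (i+1)
    · simp only [goB, if_neg hi, List.nil_append]

lemma goB_shift (sps : List (List Char)) (t : List Char) (e : Nat) :
    ∀ f parts b i, e ≤ b → b ≤ i →
      goB sps t f parts b i = goB sps (t.drop e) f parts (b - e) (i - e) := by
  intro f
  induction f with
  | zero => intro parts b i _ _; rfl
  | succ n ih =>
    intro parts b i hb hbi
    have hdd : (t.drop e).drop (i - e) = t.drop i := by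
      rw [List.drop_drop]; congr 1; omega
    have hlen : (t.drop e).length = t.length - e := List.length_drop
    have hiff : (i - e < (t.drop e).length) = (i < t.length) := by
      simp only [hlen]; apply propext; omega
    by_cases hi : i < t.length
    · have hi' : i - e < (t.drop e).length := by omega
      cases hm : sps.find? (fun sp => PySem.Chars.startswith (t.drop i) sp) with
      | some sp =>
        have hm' : sps.find? (fun sp => PySem.Chars.startswith ((t.drop e).drop (i - e)) sp) = some sp := by
          rw [hdd]; exact hm
        simp only [goB, if_pos hi, if_pos hi', hm, hm']
        have hsl : PySem.List.slice t (some (b : Int)) (some (i : Int)) =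
            PySem.List.slice (t.drop e) (some ((b - e : Nat) : Int)) (some ((i - e : Nat) : Int)) := by
          rw [PySem.List.slice_natCast, PySem.List.slice_natCast, List.drop_drop]
          have hbe : e + (b - e) = b := by omega
          rw [hbe]
          congr 1
          omega
        rw [hsl]
        have h1 : i - e + sp.length = (i + sp.length) - e := by omega
        rw [h1]
        exact ih _ (i + sp.length) (i + sp.length) (by omega) le_rfl
      | none =>
        have hm' : sps.find? (fun sp => PySem.Chars.startswith ((t.drop e).drop (i - e)) sp) = none := by
          rw [hdd]; exact hm
        simp only [goB, if_pos hi, if_pos hi', hm, hm']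
        have h1 : i - e + 1 = (i + 1) - e := by omega
        rw [h1]
        exact ih parts b (i+1) hb (by omega)
    · have hi' : ¬ i - e < (t.drop e).length := by omega
      simp only [goB, if_neg hi, if_neg hi']
      have hsl : PySem.List.slice t (some (b : Int)) none =
          PySem.List.slice (t.drop e) (some ((b - e : Nat) : Int)) none := by
        rw [PySem.List.slice_from_natCast, PySem.List.slice_from_natCast, List.drop_drop]
        have hbe : e + (b - e) = b := by omega
        rw [hbe]
      rw [hsl]

lemma goB_fuel (sps : List (List Char)) (t : List Char) (h : [] ∉ sps) :
    ∀ f₁ f₂ parts b i, 0 < f₁ → 0 < f₂ → t.length < i + f₁ → t.length < i + f₂ →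
      goB sps t f₁ parts b i = goB sps t f₂ parts b i := by
  intro f₁
  induction f₁ with
  | zero => intro f₂ parts b i hf; omega
  | succ n ih =>
    intro f₂ parts b i _ hf2 hlen1 hlen2
    cases f₂ with
    | zero => omega
    | succ m =>
      by_cases hi : i < t.length
      · cases hm : sps.find? (fun sp => PySem.Chars.startswith (t.drop i) sp) with
        | some sp =>
          have hspne : 1 ≤ sp.length := by
            have hmem := List.mem_of_find?_eq_some hm
            cases sp with
            | nil => exact absurd hmem h
            | cons c l => simp
          simp only [goB, if_pos hi, hm]
          exact ih m _ _ _ (by omega) (by omega) (by omega) (by omega)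
        | none =>
          simp only [goB, if_pos hi, hm]
          exact ih m _ _ _ (by omega) (by omega) (by omega) (by omega)
      · simp only [goB, if_neg hi]

-- ---- empty text: both sides return [[]] whatever the splitters are ----
lemma fold_zero_first (t : List Char) (l : List (List Char)) (fe : Int × Int) (hfe : fe.1 = 0) :
    l.foldl (goA_step t) fe = fe := by
  induction l with
  | nil => rfl
  | cons sp l ih =>
    have hocc := PySem.Chars.neg_one_le_find (s := t) (sub := sp)
    simp only [List.foldl_cons, goA_step]
    rw [if_neg (by rintro ⟨h1, h2⟩; rw [hfe] at h2; omega)]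
    exact ih

lemma main_empty (sps : List (List Char)) :
    goA sps 1 [] = goB sps [] 1 [] 0 0 := by
  have hA : goA sps 1 [] = [[]] := by
    simp only [goA, List.length_nil, Nat.cast_zero]
    rw [fold_zero_first [] sps ((0 : Int), 0) rfl]
    simp
  have hB : goB sps [] 1 [] 0 0 = [[]] := by
    simp only [goB]
    rw [if_neg (by simp)]
    rw [PySem.List.slice_from_natCast]
    simp
  rw [hA, hB]

-- ---- main equivalence on List Char ----
lemma main_char (sps : List (List Char)) (h : [] ∉ sps) :
    ∀ t, goA sps (t.length + 1) t = goB sps t (t.length + 1) [] 0 0 := by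
  suffices H : ∀ n t, t.length ≤ n → goA sps (t.length + 1) t = goB sps t (t.length + 1) [] 0 0 by
    intro t; exact H t.length t le_rfl
  intro n
  induction n using Nat.strong_induction_on with
  | _ n ih =>
    intro t hlen
    by_cases hex : ∃ j, pvHit sps t j
    · obtain ⟨j, sp, hfind, hmin, _, hpre, hsp1, hle⟩ := least_hit sps t h hex
      have hjlt : j < t.length := by omega
      have htail : (t.drop (j + sp.length)).length = t.length - (j + sp.length) :=
        List.length_drop
      -- A side
      rw [goA_hit sps t t.length j sp hfind hmin hpre hsp1 hle]
      rw [goA_fuel sps h t.length ((t.drop (j + sp.length)).length + 1) _ (by omega) (by omega)]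
      rw [ih (t.drop (j + sp.length)).length (by omega) _ le_rfl]
      -- B side
      have hscan := goB_scan sps t j hjlt hmin j (t.length + 1 - j) 0 [] 0 (by omega)
      have hfj : t.length + 1 - j + j = t.length + 1 := by omega
      rw [hfj] at hscan
      rw [hscan]
      have hsplit : t.length + 1 - j = (t.length - j) + 1 := by omega
      rw [hsplit]
      have hstep : goB sps t ((t.length - j) + 1) [] 0 j =
          goB sps t (t.length - j)
            [PySem.List.slice t (some ((0 : Nat) : Int)) (some ((j : Nat) : Int)), sp]
            (j + sp.length) (j + sp.length) := by
        simp only [goB, if_pos hjlt, hfind, List.nil_append]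
      rw [hstep]
      rw [goB_acc sps t (t.length - j)]
      rw [goB_shift sps t (j + sp.length) (t.length - j) _ _ _ le_rfl le_rfl]
      have hz : j + sp.length - (j + sp.length) = 0 := by omega
      rw [hz]
      rw [goB_fuel sps (t.drop (j + sp.length)) h (t.length - j)
        ((t.drop (j + sp.length)).length + 1) [] 0 0
        (by omega) (by omega) (by omega) (by omega)]
      have hs0 : PySem.List.slice t (some ((0 : Nat) : Int)) (some ((j : Nat) : Int)) = t.take j := by
        rw [PySem.List.slice_natCast]
        simp
      simp
    · push Not at hex
      rw [goA_nohit sps t t.length hex]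
      rw [goB_nohit sps t (t.length + 1) 0 [] 0 (by omega) (by omega) (fun k _ => hex k)]
      rw [PySem.List.slice_from_natCast]
      simp

-- ===== VERDICT (by name: the statement is the Claim_ definition above) =====
theorem split_at_every_splitter_spec : Claim_equal_split_at_every_splitter := by
  intro text splitters _ hpre
  unfold Spec_split_at_every_splitter split_at_every_splitter split_at_every_splitter_alt
  rcases hpre with hpre | hpre
  · subst hpre
    simp only [String.toList_empty, List.length_nil]
    rw [main_empty]
  have hnil : [] ∉ splitters.map String.toList := by
    intro hm
    rcases List.mem_map.mp hm with ⟨s, hs, hsnil⟩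
    exact hpre (by
      have : s = "" := String.toList_eq_nil_iff.mp hsnil
      simpa [this] using hs)
  rw [main_char _ hnil]
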